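-- pv_equiv track=rewrite | github.com/ankitkhare57/AI_Project_9MenMorris | utils.py | allIsMill
-- ===== SOURCE A (Python) =====
-- def isPlayer(player, board, p1, p2):
--     if (board[p1] == player and board[p2] == player):
--         return True
--     else:
--         return False
--
-- def checkNextMill(position, board, player):
--     mill = [
--         (isPlayer(player, board, 1, 2) or isPlayer(player, board, 3, 5)),
--         (isPlayer(player, board, 0, 2) or isPlayer(player, board, 9, 17)),
--         (isPlayer(player, board, 0, 1) or isPlayer(player, board, 4, 7)),
--         (isPlayer(player, board, 0, 5) or isPlayer(player, board, 11, 19)),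
--         (isPlayer(player, board, 2, 7) or isPlayer(player, board, 12, 20)),
--         (isPlayer(player, board, 0, 3) or isPlayer(player, board, 6, 7)),
--         (isPlayer(player, board, 5, 7) or isPlayer(player, board, 14, 22)),
--         (isPlayer(player, board, 2, 4) or isPlayer(player, board, 5, 6)),
--         (isPlayer(player, board, 9, 10) or isPlayer(player, board, 11, 13)),
--         (isPlayer(player, board, 8, 10) or isPlayer(player, board, 1, 17)),
--         (isPlayer(player, board, 8, 9) or isPlayer(player, board, 12, 15)),
--         (isPlayer(player, board, 3, 19) or isPlayer(player, board, 8, 13)),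
--         (isPlayer(player, board, 20, 4) or isPlayer(player, board, 10, 15)),
--         (isPlayer(player, board, 8, 11) or isPlayer(player, board, 14, 15)),
--         (isPlayer(player, board, 13, 15) or isPlayer(player, board, 6, 22)),
--         (isPlayer(player, board, 13, 14) or isPlayer(player, board, 10, 12)),
--         (isPlayer(player, board, 17, 18) or isPlayer(player, board, 19, 21)),
--         (isPlayer(player, board, 1, 9) or isPlayer(player, board, 16, 18)),
--         (isPlayer(player, board, 16, 17) or isPlayer(player, board, 20, 23)),
--         (isPlayer(player, board, 16, 21) or isPlayer(player, board, 3, 11)),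
--         (isPlayer(player, board, 12, 4) or isPlayer(player, board, 18, 23)),
--         (isPlayer(player, board, 16, 19) or isPlayer(player, board, 22, 23)),
--         (isPlayer(player, board, 6, 14) or isPlayer(player, board, 21, 23)),
--         (isPlayer(player, board, 18, 20) or isPlayer(player, board, 21, 22))
--     ]
--     return mill[position]
--
-- def allIsMill(board, player):
--     isMill = False
--     for i in range(len(board)):
--         if (board[i] == player):
--             if checkNextMill(i, board, player):
--                 isMill = True
--             else:
--                 return False
--     return isMill
-- ===== SOURCE B (Python) =====
-- MILLS = [
--     (0, 1, 2), (0, 3, 5), (1, 9, 17), (2, 4, 7),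
--     (3, 11, 19), (5, 6, 7), (4, 12, 20), (6, 14, 22),
--     (8, 9, 10), (8, 11, 13), (10, 12, 15), (13, 14, 15),
--     (16, 17, 18), (16, 19, 21), (18, 20, 23), (21, 22, 23),
-- ]
--
-- def allIsMill(board, player):
--     pieces = [i for i, c in enumerate(board) if c == player]
--     if not pieces:
--         return False
--     return all(
--         any(i in m and all(board[j] == player for j in m) for m in MILLS)
--         for i in pieces
--     )
-- ===== Notes on version B (the rewrite author's own statement) =====
-- stated objective: simpler
-- what changed: B replaces A's hand-unrolled 24-entry table of per-position neighbour-pair tests (checkNextMill/isPlayer) and the mutable-flag loop with a declarative check: collect the player's piece positions once, and require each to lie in some fully-owned mill from an explicit 16-triple MILLS list.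
import Mathlib
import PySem

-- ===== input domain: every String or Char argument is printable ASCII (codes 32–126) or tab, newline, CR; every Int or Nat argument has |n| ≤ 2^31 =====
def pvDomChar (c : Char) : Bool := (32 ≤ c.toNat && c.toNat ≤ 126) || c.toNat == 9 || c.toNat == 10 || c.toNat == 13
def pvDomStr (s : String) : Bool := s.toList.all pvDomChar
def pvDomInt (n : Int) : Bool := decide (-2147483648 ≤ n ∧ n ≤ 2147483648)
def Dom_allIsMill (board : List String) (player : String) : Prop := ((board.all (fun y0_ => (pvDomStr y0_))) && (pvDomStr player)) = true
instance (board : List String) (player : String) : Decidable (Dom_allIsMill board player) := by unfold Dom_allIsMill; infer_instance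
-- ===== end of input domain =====

-- B replaces A's hand-unrolled per-position pair table with an explicit 16-mill list checked
-- declaratively per piece (objective: simpler); equivalence is about the return value only.

-- ===== PORT A =====
def isPlayerA (player : String) (board : List String) (p1 p2 : Int) : Bool :=
  if PySem.List.pyGetD board p1 "" = player ∧ PySem.List.pyGetD board p2 "" = player then true
  else false

def checkNextMill (position : Int) (board : List String) (player : String) : Bool :=
  let mill : List Bool := [
    (isPlayerA player board 1 2 || isPlayerA player board 3 5),
    (isPlayerA player board 0 2 || isPlayerA player board 9 17),
    (isPlayerA player board 0 1 || isPlayerA player board 4 7),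
    (isPlayerA player board 0 5 || isPlayerA player board 11 19),
    (isPlayerA player board 2 7 || isPlayerA player board 12 20),
    (isPlayerA player board 0 3 || isPlayerA player board 6 7),
    (isPlayerA player board 5 7 || isPlayerA player board 14 22),
    (isPlayerA player board 2 4 || isPlayerA player board 5 6),
    (isPlayerA player board 9 10 || isPlayerA player board 11 13),
    (isPlayerA player board 8 10 || isPlayerA player board 1 17),
    (isPlayerA player board 8 9 || isPlayerA player board 12 15),
    (isPlayerA player board 3 19 || isPlayerA player board 8 13),
    (isPlayerA player board 20 4 || isPlayerA player board 10 15),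
    (isPlayerA player board 8 11 || isPlayerA player board 14 15),
    (isPlayerA player board 13 15 || isPlayerA player board 6 22),
    (isPlayerA player board 13 14 || isPlayerA player board 10 12),
    (isPlayerA player board 17 18 || isPlayerA player board 19 21),
    (isPlayerA player board 1 9 || isPlayerA player board 16 18),
    (isPlayerA player board 16 17 || isPlayerA player board 20 23),
    (isPlayerA player board 16 21 || isPlayerA player board 3 11),
    (isPlayerA player board 12 4 || isPlayerA player board 18 23),
    (isPlayerA player board 16 19 || isPlayerA player board 22 23),
    (isPlayerA player board 6 14 || isPlayerA player board 21 23),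
    (isPlayerA player board 18 20 || isPlayerA player board 21 22)]
  PySem.List.pyGetD mill position false

def allIsMillGo (board : List String) (player : String) : List Int → Bool → Bool
  | [], isMill => isMill
  | i :: rest, isMill =>
    if PySem.List.pyGetD board i "" = player then
      if checkNextMill i board player then allIsMillGo board player rest true
      else false
    else allIsMillGo board player rest isMill

def allIsMill (board : List String) (player : String) : Bool :=
  allIsMillGo board player (PySem.List.pyRange 0 (PySem.List.len board) 1) false

-- ===== PORT B =====
def MILLS : List (List Int) :=
  [[0, 1, 2], [0, 3, 5], [1, 9, 17], [2, 4, 7],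
   [3, 11, 19], [5, 6, 7], [4, 12, 20], [6, 14, 22],
   [8, 9, 10], [8, 11, 13], [10, 12, 15], [13, 14, 15],
   [16, 17, 18], [16, 19, 21], [18, 20, 23], [21, 22, 23]]

def pieceInMill (board : List String) (player : String) (i : Int) : Bool :=
  MILLS.any (fun m => m.contains i && m.all (fun j => PySem.List.pyGetD board j "" == player))

def allIsMill_alt (board : List String) (player : String) : Bool :=
  let pieces := ((PySem.List.enumerate board).filter (fun p => p.2 == player)).map Prod.fst
  if pieces.isEmpty then false
  else pieces.all (fun i => pieceInMill board player i)

-- ===== PRECONDITION & SPEC =====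
-- Pre_ excludes boards that contain a player piece but are not exactly 24 cells long: there the
-- Python A (checkNextMill indexes cells 0..23 and mill[position]) in general raises IndexError;
-- on the few such boards where an early `return False` pre-empts the bad access, A returns a
-- value B also returns (see cites).
def Pre_allIsMill (board : List String) (player : String) : Prop :=
  ¬ player ∈ board ∨ board.length = 24

instance (board : List String) (player : String) : Decidable (Pre_allIsMill board player) := by
  unfold Pre_allIsMill; infer_instance

def pvWitness_allIsMill : List String × String :=
  (["x", "x", "x", "-", "-", "-", "-", "-", "-", "-", "-", "-",
    "-", "-", "-", "-", "-", "-", "-", "-", "-", "-", "-", "-"], "x")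

def Spec_allIsMill (board : List String) (player : String) (out : Bool) : Prop := out = allIsMill_alt board player
instance (board : List String) (player : String) (out : Bool) : Decidable (Spec_allIsMill board player out) := by unfold Spec_allIsMill; infer_instance

-- ===== CLAIM (what is proved, stated in full; the proofs are below) =====
def Claim_equal_allIsMill : Prop := ∀ (board : List String) (player : String), Dom_allIsMill board player → Pre_allIsMill board player → Spec_allIsMill board player (allIsMill board player)


-- ===== LEMMAS AND PROOFS =====

-- the two per-piece checks agree on every index 0..23 at which the board holds a player piece
lemma isPlayerA_eq (player : String) (board : List String) (p1 p2 : Int) :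
    isPlayerA player board p1 p2
      = ((PySem.List.pyGetD board p1 "" == player) && (PySem.List.pyGetD board p2 "" == player)) := by
  by_cases h1 : PySem.List.pyGetD board p1 "" = player <;>
    by_cases h2 : PySem.List.pyGetD board p2 "" = player <;>
      simp [isPlayerA, h1, h2]

-- the two per-piece checks agree on every index 0..23 at which the board holds a player piece
set_option maxHeartbeats 2000000 in
lemma check_eq_pieceInMill (board : List String) (player : String) (i : Int)
    (h0 : 0 ≤ i) (h24 : i < 24) (hp : (PySem.List.pyGetD board i "" == player) = true) :
    checkNextMill i board player = pieceInMill board player i := by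
  have hp' : PySem.List.pyGetD board i "" = player := by simpa using hp
  interval_cases i <;>
    simp only [PySem.List.pyGetD_ofNat', List.getD_eq_getElem?_getD] at hp' <;>
    simp [checkNextMill, pieceInMill, MILLS, isPlayerA_eq, PySem.List.pyGetD_ofNat',
      List.getD, hp'] <;>
    simp [Bool.or_comm, Bool.and_comm, Bool.or_left_comm, Bool.and_left_comm]

-- characterisation of A's loop
lemma go_char (board : List String) (player : String) (is : List Int) (acc : Bool) :
    allIsMillGo board player is acc =
      if is.all (fun i => !(PySem.List.pyGetD board i "" == player) || checkNextMill i board player)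
      then acc || is.any (fun i => PySem.List.pyGetD board i "" == player)
      else false := by
  induction is generalizing acc with
  | nil => simp [allIsMillGo]
  | cons i rest ih =>
    by_cases hp : PySem.List.pyGetD board i "" = player
    · by_cases hc : checkNextMill i board player = true
      · simp [allIsMillGo, hp, hc, ih]
      · simp [allIsMillGo, hp, Bool.eq_false_iff.mpr hc]
    · have hbe : (PySem.List.pyGetD board i "" == player) = false := by simp [hp]
      simp [allIsMillGo, hp, hbe, ih]

-- B's piece list is the filtered index range
lemma pieces_eq (board : List String) (player : String) :
    ((PySem.List.enumerate board).filter (fun p => p.2 == player)).map Prod.fst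
      = (PySem.List.pyRange 0 (PySem.List.len board) 1).filter
          (fun i => PySem.List.pyGetD board i "" == player) := by
  rw [PySem.List.enumerate_eq_map_pyRange board ""]
  rw [List.filter_map, List.map_map]
  simp [Function.comp_def]

-- `List.all` only depends on the values of the predicate on the list's members
lemma all_congr_mem (l : List Int) (f g : Int → Bool) (h : ∀ i ∈ l, f i = g i) :
    l.all f = l.all g := by
  induction l with
  | nil => rfl
  | cons a t ih =>
    simp only [List.all_cons, h a (by simp), ih (fun i hi => h i (by simp [hi]))]

-- ===== VERDICT (by name: the statement is the Claim_ definition above) =====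
theorem allIsMill_spec : Claim_equal_allIsMill := by
  intro board player _ hpre
  show allIsMill board player = allIsMill_alt board player
  rw [allIsMill, go_char, allIsMill_alt]
  simp only [pieces_eq]
  set R := PySem.List.pyRange 0 (PySem.List.len board) 1 with hR
  set piece : Int → Bool := fun i => PySem.List.pyGetD board i "" == player with hpiece
  have hpt : ∀ i ∈ R, (!piece i || checkNextMill i board player)
      = (!piece i || pieceInMill board player i) := by
    intro i hiR
    cases hpi : piece i with
    | false => simp
    | true =>
      have hiR' := (PySem.List.mem_pyRange_one).1 hiR
      have hpv : PySem.List.pyGetD board i "" = player := by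
        have := hpi; simp only [hpiece, beq_iff_eq] at this; exact this
      have hmem : PySem.List.pyGetD board i "" ∈ board := by
        apply PySem.List.pyGetD_mem
        simp only [PySem.Raise.InRange]
        simp only [PySem.List.len_eq] at hiR'
        omega
      rcases hpre with hnp | hlen
      · exact absurd (hpv ▸ hmem) hnp
      · simp only [Bool.not_true, Bool.false_or]
        refine check_eq_pieceInMill board player i hiR'.1 ?_ (by simp [hpv])
        have h2 := hiR'.2
        simp only [PySem.List.len_eq, hlen] at h2
        exact_mod_cast h2
  have hall : (R.all fun i => !piece i || checkNextMill i board player)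
      = (R.all fun i => !piece i || pieceInMill board player i) :=
    all_congr_mem R _ _ hpt
  by_cases hany : R.any piece = true
  · have hne : (R.filter piece).isEmpty = false := by
      obtain ⟨i, hiR, hpi⟩ := List.any_eq_true.1 hany
      have hmem : i ∈ R.filter piece := List.mem_filter.2 ⟨hiR, hpi⟩
      cases hie : (R.filter piece).isEmpty
      · rfl
      · rw [List.isEmpty_iff] at hie
        rw [hie] at hmem
        cases hmem
    rw [hall]
    cases hv : (R.all fun i => !piece i || pieceInMill board player i) <;>
      simp [hne, List.all_filter, hany, hv]
  · have hanyf : R.any piece = false := by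
      cases h : R.any piece
      · rfl
      · exact absurd h hany
    have hnp : ∀ i ∈ R, piece i = false := by
      intro i hiR
      cases h : piece i
      · rfl
      · exact absurd (List.any_eq_true.2 ⟨i, hiR, h⟩) hany
    have hflt : R.filter piece = [] := by
      rw [List.filter_eq_nil_iff]
      intro i hiR
      simp [hnp i hiR]
    have hallc : (R.all fun i => !piece i || checkNextMill i board player) = true := by
      rw [List.all_eq_true]
      intro i hiR
      simp [hnp i hiR]
    rw [hallc, hflt]
    simp [hanyf]
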